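-- pv_equiv track=rewrite | github.com/vsocrates/hail-dischargeme | notebooks/brief_hospital_course/preprocessing.py | inject_subheading_info
-- ===== SOURCE A (Python) =====
-- def inject_subheading_info(document, subheadings, dataframe_info):
--     # Split the document into lines
--     lines = document.split("\n")
--
--     # Initialize variables to build the new document
--     found_subheading = False
--
--     # Iterate through each line to find the subheading
--     for i in range(len(lines) - 1):
--         current_line = lines[i].strip()
--
--         # Iterate through all the possible variants in the subheadings list
--         for subheading in subheadings:
--             # Check if the current line is the subheading
--             if current_line == subheading:
--                 found_subheading = True
--                 return document
--
--     # Check if subheading was never found, add it at the end if needed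
--     if not found_subheading:
--         document = document + "\n" + subheadings[0]
--         document = document + "\n" + dataframe_info
--
--     # Join all lines to form the new document
--     return document
-- ===== SOURCE B (Python) =====
-- def inject_subheading_info(document, subheadings, dataframe_info):
--     # Sort-then-merge: sort the stripped non-final lines and the subheadings,
--     # then run a two-pointer merge to test whether the two sorted sequences
--     # share an element (correct because both sides are sorted, so the smaller
--     # head can never appear further on in the other list).
--     lines = document.split("\n")
--     a = sorted(line.strip() for line in lines[:-1])
--     b = sorted(subheadings)
--     i = j = 0
--     while i < len(a) and j < len(b):
--         if a[i] == b[j]: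
--             return document
--         if a[i] < b[j]:
--             i += 1
--         else:
--             j += 1
--     return document + "\n" + subheadings[0] + "\n" + dataframe_info
-- ===== Notes on version B (the rewrite author's own statement) =====
-- stated objective: alternative
-- what changed: Replaces A's nested scan (each non-final line compared against every subheading) by sort-then-merge: both the stripped non-final lines and the subheadings are sorted and a two-pointer merge detects a common element; Pre_ excludes empty subheadings lists, on which both programs raise IndexError at subheadings[0].
import Mathlib
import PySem

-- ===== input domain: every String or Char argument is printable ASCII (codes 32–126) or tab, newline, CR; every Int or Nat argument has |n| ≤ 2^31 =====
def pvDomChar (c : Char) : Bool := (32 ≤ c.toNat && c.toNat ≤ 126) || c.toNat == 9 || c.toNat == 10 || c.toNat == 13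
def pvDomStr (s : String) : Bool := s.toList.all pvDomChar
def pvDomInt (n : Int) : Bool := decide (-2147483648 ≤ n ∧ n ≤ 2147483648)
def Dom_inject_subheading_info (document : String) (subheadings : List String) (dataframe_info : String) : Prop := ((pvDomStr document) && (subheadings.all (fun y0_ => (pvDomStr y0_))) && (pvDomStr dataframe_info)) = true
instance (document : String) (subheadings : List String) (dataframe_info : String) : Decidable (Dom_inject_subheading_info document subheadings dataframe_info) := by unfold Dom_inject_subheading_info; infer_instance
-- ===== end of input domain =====

-- B replaces A's nested line-by-subheading scan by sort-then-merge (sort both sides,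
-- two-pointer common-element test); equivalence proved on nonempty subheadings lists.

-- ===== PORT A =====
-- for i in range(len(lines)-1): for subheading in subheadings: if strip == subheading: return document
-- early return transliterated as a recursive scan over the first len-1 lines
def injARec (subheadings : List String) : List String -> Bool
  | [] => false
  | l :: ls => if subheadings.any (fun sub => PySem.Str.strip l == sub) then true else injARec subheadings ls

def inject_subheading_info (document : String) (subheadings : List String) (dataframe_info : String) : String :=
  let lines := (PySem.Str.split? document "\n").getD []  -- sep "\n" ≠ "", so split? is some
  if injARec subheadings (lines.take (lines.length - 1)) then document
  else document ++ "\n" ++ PySem.List.pyGetD subheadings 0 "" ++ "\n" ++ dataframe_info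
  -- pyGetD … 0 "": subheadings[0]; exact under Pre_ (subheadings nonempty)

-- ===== PORT B =====
-- the two-pointer while loop of Source B, as the obvious structural recursion on the two sorted lists
def mergeCommon : List String → List String → Bool
  | [], _ => false
  | _ :: _, [] => false
  | x :: xs, y :: ys =>
      if x == y then true
      else if x < y then mergeCommon xs (y :: ys)
      else mergeCommon (x :: xs) ys

def inject_subheading_info_alt (document : String) (subheadings : List String) (dataframe_info : String) : String :=
  let lines := (PySem.Str.split? document "\n").getD []  -- sep "\n" ≠ "", so split? is some
  let a := PySem.List.sorted (lines.dropLast.map PySem.Str.strip) (fun x => x) false  -- sorted(strip of lines[:-1])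
  let b := PySem.List.sorted subheadings (fun x => x) false                           -- sorted(subheadings)
  if mergeCommon a b then document
  else document ++ "\n" ++ PySem.List.pyGetD subheadings 0 "" ++ "\n" ++ dataframe_info

-- ===== PRECONDITION & SPEC =====
-- Pre_: both programs execute subheadings[0] whenever no line matches, so an empty
-- subheadings list always raises IndexError in A (and in B); exactly those inputs are excluded.
def Pre_inject_subheading_info (document : String) (subheadings : List String) (dataframe_info : String) : Prop :=
  subheadings ≠ []
instance (document : String) (subheadings : List String) (dataframe_info : String) : Decidable (Pre_inject_subheading_info document subheadings dataframe_info) := by unfold Pre_inject_subheading_info; infer_instance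

def pvWitness_inject_subheading_info : String × List String × String := ("a\nX\nb", ["X"], "INFO")

def Spec_inject_subheading_info (document : String) (subheadings : List String) (dataframe_info : String) (out : String) : Prop := out = inject_subheading_info_alt document subheadings dataframe_info
instance (document : String) (subheadings : List String) (dataframe_info : String) (out : String) : Decidable (Spec_inject_subheading_info document subheadings dataframe_info out) := by unfold Spec_inject_subheading_info; infer_instance

-- ===== CLAIM (what is proved, stated in full; the proofs are below) =====
def Claim_equal_inject_subheading_info : Prop := ∀ (document : String) (subheadings : List String) (dataframe_info : String), Dom_inject_subheading_info document subheadings dataframe_info → Pre_inject_subheading_info document subheadings dataframe_info → Spec_inject_subheading_info document subheadings dataframe_info (inject_subheading_info document subheadings dataframe_info)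

-- ===== LEMMAS AND PROOFS =====

-- A's scan finds a match iff some line's strip is in the list of subheadings
lemma injARec_eq_any (subheadings ls : List String) :
    injARec subheadings ls = ls.any (fun l => subheadings.any (fun sub => PySem.Str.strip l == sub)) := by
  induction ls with
  | nil => rfl
  | cons l ls ih =>
    simp only [injARec, List.any_cons, ih]
    by_cases h : subheadings.any (fun sub => PySem.Str.strip l == sub) <;> simp [h]

-- two-pointer merge correctness: on sorted lists it detects exactly a common element
lemma mergeCommon_iff (xs ys : List String)
    (hx : xs.Pairwise (· ≤ ·)) (hy : ys.Pairwise (· ≤ ·)) :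
    mergeCommon xs ys = true ↔ ∃ a, a ∈ xs ∧ a ∈ ys := by
  induction xs, ys using mergeCommon.induct with
  | case1 ys => simp [mergeCommon]
  | case2 x xs => simp [mergeCommon]
  | case3 x xs y ys heq =>
    rw [mergeCommon, if_pos heq]
    exact iff_of_true rfl ⟨x, List.mem_cons_self, by simp [eq_of_beq heq]⟩
  | case4 x xs y ys hne hlt ih =>
    have hx' := (List.pairwise_cons.mp hx).2
    have hyall := (List.pairwise_cons.mp hy).1
    rw [mergeCommon, if_neg (by simp [hne]), if_pos hlt, ih hx' hy]
    constructor
    · rintro ⟨a, ha, hb⟩; exact ⟨a, List.mem_cons_of_mem _ ha, hb⟩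
    · rintro ⟨a, ha, hb⟩
      rcases List.mem_cons.mp ha with rfl | ha
      · rcases List.mem_cons.mp hb with rfl | hb
        · exact absurd hlt (lt_irrefl a)
        · exact absurd (lt_of_lt_of_le hlt (hyall _ hb)) (lt_irrefl a)
      · exact ⟨a, ha, hb⟩
  | case5 x xs y ys hne hnlt ih =>
    have hy' := (List.pairwise_cons.mp hy).2
    have hxall := (List.pairwise_cons.mp hx).1
    have hylt : y < x := lt_of_le_of_ne (not_lt.mp hnlt) (fun h => by simp [h] at hne)
    rw [mergeCommon, if_neg (by simp [hne]), if_neg hnlt, ih hx hy']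
    constructor
    · rintro ⟨a, ha, hb⟩; exact ⟨a, ha, List.mem_cons_of_mem _ hb⟩
    · rintro ⟨a, ha, hb⟩
      rcases List.mem_cons.mp hb with rfl | hb
      · rcases List.mem_cons.mp ha with rfl | ha
        · exact absurd hylt (lt_irrefl a)
        · exact absurd (lt_of_lt_of_le hylt (hxall _ ha)) (lt_irrefl a)
      · exact ⟨a, ha, hb⟩

-- the two found-tests agree
lemma found_eq (subheadings ls : List String) :
    injARec subheadings ls
      = mergeCommon (PySem.List.sorted (ls.map PySem.Str.strip) (fun x => x) false)
                    (PySem.List.sorted subheadings (fun x => x) false) := by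
  rw [injARec_eq_any, Bool.eq_iff_iff,
      mergeCommon_iff _ _ (PySem.List.sorted_pairwise _ _) (PySem.List.sorted_pairwise _ _)]
  simp only [List.any_eq_true, PySem.List.mem_sorted, List.mem_map, beq_iff_eq]
  constructor
  · rintro ⟨l, hl, sub, hsub, hEq⟩; exact ⟨sub, ⟨l, hl, hEq⟩, hsub⟩
  · rintro ⟨a, ⟨l, hl, hEq⟩, hsub⟩; exact ⟨l, hl, a, hsub, hEq⟩

-- ===== VERDICT (by name: the statement is the Claim_ definition above) =====
theorem inject_subheading_info_spec : Claim_equal_inject_subheading_info := by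
  intro document subheadings dataframe_info _ _
  unfold Spec_inject_subheading_info inject_subheading_info inject_subheading_info_alt
  simp only [List.dropLast_eq_take, ← found_eq]
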